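-- pv_equiv track=rewrite | github.com/SofferLior/TAU_Israel_Software | TailOR_Swift.py | find_target_seq
-- ===== SOURCE A (Python) =====
-- def find_target_seq(domain_file):
--     seq_found = False
--     seq = ""
--     for line in domain_file.splitlines():
--         if line.startswith("Query"):
--             seq_found = True
--         elif seq_found and line != "":
--             seq += line
--         elif seq_found and line == "":
--             break
--     seq = seq.replace(" ", "")
--     return seq, len(seq)
-- ===== SOURCE B (Python) =====
-- def find_target_seq(domain_file):
--     lines = domain_file.splitlines()
--     rest = None
--     for i, l in enumerate(lines):
--         if l.startswith("Query"):
--             rest = lines[i + 1:]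
--             break
--     if rest is None:
--         return "", 0
--     if "" in rest:
--         rest = rest[:rest.index("")]
--     seq = "".join(l for l in rest if not l.startswith("Query")).replace(" ", "")
--     return seq, len(seq)
-- ===== Notes on version B (the rewrite author's own statement) =====
-- stated objective: simpler
-- what changed: A's single stateful loop with a seq_found flag and break is replaced by a pipeline: locate the first 'Query' header line, slice the lines after it, truncate at the first blank line, filter out 'Query' lines, join and strip spaces.
import Mathlib
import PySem

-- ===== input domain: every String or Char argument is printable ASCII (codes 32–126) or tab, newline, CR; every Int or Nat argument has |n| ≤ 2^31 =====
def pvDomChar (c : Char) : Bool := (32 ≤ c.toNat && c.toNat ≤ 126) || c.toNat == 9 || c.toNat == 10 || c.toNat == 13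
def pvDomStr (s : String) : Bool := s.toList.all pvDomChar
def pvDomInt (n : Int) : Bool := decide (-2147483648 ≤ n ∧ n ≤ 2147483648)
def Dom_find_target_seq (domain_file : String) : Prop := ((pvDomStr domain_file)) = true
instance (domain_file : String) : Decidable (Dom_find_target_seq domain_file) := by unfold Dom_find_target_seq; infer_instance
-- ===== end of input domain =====

-- B replaces A's stateful flag-and-break loop by locate-header / slice / truncate-at-blank / filter-join (objective: simpler decomposition, same cost).

-- ===== PORT A =====
-- the for-loop with its seq_found flag, in-order branches and break
def pvLoopA : List (List Char) → Bool → List Char → List Char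
  | [], _, seq => seq
  | l :: ls, seq_found, seq =>
    if PySem.Chars.startswith l ("Query".toList) then pvLoopA ls true seq
    else if seq_found ∧ l ≠ [] then pvLoopA ls seq_found (seq ++ l)
    else if seq_found ∧ l = [] then seq
    else pvLoopA ls seq_found seq

def find_target_seq (domain_file : String) : String × Int :=
  let seq := pvLoopA (PySem.Chars.splitlines domain_file.toList) false []
  let seq := PySem.Chars.replace seq [' '] []
  (String.ofList seq, (seq.length : Int))

-- ===== PORT B =====
-- the enumerate loop of Source B: lines after the first 'Query' header, or none
def pvRestAfterQuery : List (List Char) → Option (List (List Char))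
  | [] => none
  | l :: ls => if PySem.Chars.startswith l ("Query".toList) then some ls else pvRestAfterQuery ls

def find_target_seq_alt (domain_file : String) : String × Int :=
  let lines := PySem.Chars.splitlines domain_file.toList
  match pvRestAfterQuery lines with
  | none => ("", 0)
  | some rest =>
    let rest2 := if ([] : List Char) ∈ rest
                 then rest.take ((PySem.List.index? rest ([] : List Char)).getD 0)
                 else rest
    let seq := PySem.Chars.replace
      (PySem.Chars.join [] (rest2.filter (fun l => !PySem.Chars.startswith l ("Query".toList))))
      [' '] []
    (String.ofList seq, (seq.length : Int))

-- ===== PRECONDITION & SPEC =====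
def Spec_find_target_seq (domain_file : String) (out : String × Int) : Prop := out = find_target_seq_alt domain_file
instance (domain_file : String) (out : String × Int) : Decidable (Spec_find_target_seq domain_file out) := by unfold Spec_find_target_seq; infer_instance

-- ===== CLAIM (what is proved, stated in full; the proofs are below) =====
def Claim_equal_find_target_seq : Prop := ∀ (domain_file : String), Dom_find_target_seq domain_file → Spec_find_target_seq domain_file (find_target_seq domain_file)

-- ===== LEMMAS AND PROOFS =====

-- "".join is flatten
theorem pv_join_nil_eq_flatten (parts : List (List Char)) :
    PySem.Chars.join [] parts = parts.flatten := by
  induction parts with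
  | nil => rfl
  | cons h t ih =>
    cases t with
    | nil => simp [PySem.Chars.join, List.intercalate]
    | cons h' t' =>
      simp only [PySem.Chars.join, List.intercalate] at *
      simp_all [List.intersperse]

-- truncating at the first blank line is takeWhile (· ≠ [])
theorem pv_trunc_eq_takeWhile (rest : List (List Char)) :
    (if ([] : List Char) ∈ rest
     then rest.take ((PySem.List.index? rest ([] : List Char)).getD 0)
     else rest) = rest.takeWhile (fun l => !l.isEmpty) := by
  induction rest with
  | nil => simp
  | cons h t ih =>
    by_cases hh : h = ([] : List Char)
    · subst hh
      rw [PySem.List.index?_cons_self]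
      simp [List.takeWhile]
    · have h1 : PySem.List.index? (h :: t) ([] : List Char) =
          (PySem.List.index? t ([] : List Char)).map (· + 1) :=
        PySem.List.index?_cons_of_ne t hh
      by_cases hm : ([] : List Char) ∈ t
      · obtain ⟨k, hk⟩ := Option.isSome_iff_exists.mp
          ((PySem.List.index?_isSome_iff t ([] : List Char)).mpr hm)
        have hne : h.isEmpty = false := by simp [List.isEmpty_eq_false_iff, hh]
        have h2 : PySem.List.index? (h :: t) ([] : List Char) = some (k + 1) := by
          rw [h1, hk]; rfl
        rw [if_pos (show ([] : List Char) ∈ h :: t from List.mem_cons.mpr (Or.inr hm)), h2]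
        rw [if_pos hm, hk] at ih
        simp [hne, ← ih]
      · have hne : h.isEmpty = false := by simp [List.isEmpty_eq_false_iff, hh]
        have hh' : ([] : List Char) ≠ h := fun e => hh e.symm
        simp [hne, hm, hh', ← ih]

-- the flag-true phase of A's loop: append the non-Query lines up to the first blank
theorem pv_loopA_true (ls : List (List Char)) : ∀ acc,
    pvLoopA ls true acc =
      acc ++ ((ls.takeWhile (fun l => !l.isEmpty)).filter
        (fun l => !PySem.Chars.startswith l ("Query".toList))).flatten := by
  induction ls with
  | nil => intro acc; simp [pvLoopA]
  | cons l t ih =>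
    intro acc
    by_cases hq : PySem.Chars.startswith l ['Q','u','e','r','y'] = true
    · have hne : l.isEmpty = false := by
        have : l ≠ [] := by intro h; subst h; exact absurd hq (by decide)
        simp [List.isEmpty_eq_false_iff, this]
      simp [pvLoopA, hq, List.takeWhile, hne, ih]
    · by_cases he : l = ([] : List Char)
      · subst he
        have : PySem.Chars.startswith ([] : List Char) ['Q','u','e','r','y'] = false := by decide
        simp [pvLoopA, this, List.takeWhile]
      · have hne : l.isEmpty = false := by simp [List.isEmpty_eq_false_iff, he]
        simp [pvLoopA, hq, he, hne, List.takeWhile, ih]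

-- the flag-false phase of A's loop: skip to the first Query header (B's search)
theorem pv_loopA_false (ls : List (List Char)) :
    pvLoopA ls false [] =
      match pvRestAfterQuery ls with
      | none => []
      | some rest => pvLoopA rest true [] := by
  induction ls with
  | nil => rfl
  | cons l t ih =>
    by_cases hq : PySem.Chars.startswith l ['Q','u','e','r','y'] = true
    · simp [pvLoopA, pvRestAfterQuery, hq]
    · simp [pvLoopA, pvRestAfterQuery, hq, ih]

-- ===== VERDICT (by name: the statement is the Claim_ definition above) =====
theorem find_target_seq_spec : Claim_equal_find_target_seq := by
  intro domain_file _
  unfold Spec_find_target_seq find_target_seq find_target_seq_alt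
  rw [pv_loopA_false]
  cases hr : pvRestAfterQuery (PySem.Chars.splitlines domain_file.toList) with
  | none => simp only [hr]; rfl
  | some rest => simp only [hr, pv_trunc_eq_takeWhile, pv_join_nil_eq_flatten, pv_loopA_true, List.nil_append]
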